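-- pv_equiv track=rewrite | github.com/Sketos/utils | list_utils.py | filter_input_list_of_strings_after_split_with_list_of_string
-- ===== SOURCE A (Python) =====
-- def filter_input_list_of_strings_after_split_with_list_of_string(input_list_of_strings, split_character, list_of_string):
--
--     output_list_of_strings = []
--     for i, i_string in enumerate(input_list_of_strings):
--         i_string_splitted = i_string.split(split_character)
--
--         if all([
--             string in i_string_splitted
--             for string in list_of_string
--         ]):
--             output_list_of_strings.append(i_string)
--
--     return output_list_of_strings
-- ===== SOURCE B (Python) =====
-- def filter_input_list_of_strings_after_split_with_list_of_string(input_list_of_strings, split_character, list_of_string):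
--     output = list(input_list_of_strings)
--     for target in list_of_string:
--         output = [s for s in output if target in s.split(split_character)]
--     return output
-- ===== Notes on version B (the rewrite author's own statement) =====
-- stated objective: alternative
-- what changed: Transposes the loop nesting: instead of one pass over the input checking all() targets per string, B applies one filter pass per target, successively narrowing the candidate list.
import Mathlib
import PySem

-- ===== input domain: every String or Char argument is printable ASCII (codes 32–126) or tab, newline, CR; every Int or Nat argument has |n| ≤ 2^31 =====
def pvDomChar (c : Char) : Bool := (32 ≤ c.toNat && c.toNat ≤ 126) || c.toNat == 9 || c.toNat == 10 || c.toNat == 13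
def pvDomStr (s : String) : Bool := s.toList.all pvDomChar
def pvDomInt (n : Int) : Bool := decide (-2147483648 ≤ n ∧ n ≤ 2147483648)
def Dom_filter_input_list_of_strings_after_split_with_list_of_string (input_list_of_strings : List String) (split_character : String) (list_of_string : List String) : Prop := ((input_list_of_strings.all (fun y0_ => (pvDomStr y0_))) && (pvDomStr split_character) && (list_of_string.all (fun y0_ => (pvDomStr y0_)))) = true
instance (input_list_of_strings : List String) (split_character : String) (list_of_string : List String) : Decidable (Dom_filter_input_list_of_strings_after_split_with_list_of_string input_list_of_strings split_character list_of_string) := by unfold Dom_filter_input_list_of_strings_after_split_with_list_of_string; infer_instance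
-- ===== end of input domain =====

-- B transposes the loop nesting: one filter pass per target instead of a single pass with an all() conjunction; alternative decomposition, same cost.


-- ===== PORT A =====
-- s.split(sep) for sep ≠ "" (exact: PySem.Chars.splitOn is the sep ≠ "" form of Python's str.split)
def pvSplit (s sep : String) : List String :=
  (PySem.Chars.splitOn s.toList sep.toList).map (fun cs => String.mk cs)

-- one pass over enumerate(input); keep i_string iff every target is in its split
def filter_input_list_of_strings_after_split_with_list_of_string (input_list_of_strings : List String) (split_character : String) (list_of_string : List String) : List String :=
  (PySem.List.enumerate input_list_of_strings).foldl
    (fun output_list_of_strings p =>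
      let i_string_splitted := pvSplit p.2 split_character
      if (list_of_string.map (fun string => i_string_splitted.contains string)).all (fun b => b) then
        output_list_of_strings ++ [p.2]
      else output_list_of_strings) []

-- ===== PORT B =====
-- one filter pass per target, successively narrowing the candidate list
def filter_input_list_of_strings_after_split_with_list_of_string_alt (input_list_of_strings : List String) (split_character : String) (list_of_string : List String) : List String :=
  list_of_string.foldl
    (fun output target =>
      output.filter (fun s => (pvSplit s split_character).contains target))
    input_list_of_strings

-- ===== PRECONDITION & SPEC =====
-- Pre_ excludes only the inputs on which A raises: an empty separator with a nonempty input list, where str.split('') raises ValueError (with an empty input list split is never called and A returns []).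
def Pre_filter_input_list_of_strings_after_split_with_list_of_string (input_list_of_strings : List String) (split_character : String) (list_of_string : List String) : Prop := split_character ≠ "" ∨ input_list_of_strings = []
instance (input_list_of_strings : List String) (split_character : String) (list_of_string : List String) : Decidable (Pre_filter_input_list_of_strings_after_split_with_list_of_string input_list_of_strings split_character list_of_string) := by unfold Pre_filter_input_list_of_strings_after_split_with_list_of_string; infer_instance
def pvWitness_filter_input_list_of_strings_after_split_with_list_of_string : List String × String × List String := (["a,b", "c"], ",", ["a"])
def Spec_filter_input_list_of_strings_after_split_with_list_of_string (input_list_of_strings : List String) (split_character : String) (list_of_string : List String) (out : List String) : Prop := out = filter_input_list_of_strings_after_split_with_list_of_string_alt input_list_of_strings split_character list_of_string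
instance (input_list_of_strings : List String) (split_character : String) (list_of_string : List String) (out : List String) : Decidable (Spec_filter_input_list_of_strings_after_split_with_list_of_string input_list_of_strings split_character list_of_string out) := by unfold Spec_filter_input_list_of_strings_after_split_with_list_of_string; infer_instance

-- ===== CLAIM (what is proved, stated in full; the proofs are below) =====
def Claim_equal_filter_input_list_of_strings_after_split_with_list_of_string : Prop := ∀ (input_list_of_strings : List String) (split_character : String) (list_of_string : List String), Dom_filter_input_list_of_strings_after_split_with_list_of_string input_list_of_strings split_character list_of_string → Pre_filter_input_list_of_strings_after_split_with_list_of_string input_list_of_strings split_character list_of_string → Spec_filter_input_list_of_strings_after_split_with_list_of_string input_list_of_strings split_character list_of_string (filter_input_list_of_strings_after_split_with_list_of_string input_list_of_strings split_character list_of_string)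

-- ===== LEMMAS AND PROOFS =====

-- filtering enumerate on a predicate of the element only, then projecting, is filtering the list
theorem pv_enum_filter_map {α : Type} (l : List α) (s : Int) (p : α → Bool) :
    (((PySem.List.enumerate l s).filter (fun q => p q.2)).map (fun q => q.2)) = l.filter p := by
  induction l generalizing s with
  | nil => simp [PySem.List.enumerate_nil]
  | cons x xs ih =>
    simp only [PySem.List.enumerate_cons, List.filter_cons]
    by_cases h : p x <;> simp [h, ih]

-- A computes the one-shot filter by the conjunction of all targets
theorem pv_A_eq_filter (inp : List String) (sep : String) (ts : List String) :
    filter_input_list_of_strings_after_split_with_list_of_string inp sep ts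
      = inp.filter (fun s => ts.all (fun t => (pvSplit s sep).contains t)) := by
  unfold filter_input_list_of_strings_after_split_with_list_of_string
  rw [PySem.List.foldl_append_if (f := fun (q : Int × String) => q.2)]
  simp only [List.nil_append, List.all_map, Function.comp_def]
  exact pv_enum_filter_map inp 0 (fun s => ts.all (fun t => (pvSplit s sep).contains t))

-- B's successive filters compose into the same one-shot filter
theorem pv_B_eq_filter (inp : List String) (sep : String) (ts : List String) :
    filter_input_list_of_strings_after_split_with_list_of_string_alt inp sep ts
      = inp.filter (fun s => ts.all (fun t => (pvSplit s sep).contains t)) := by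
  unfold filter_input_list_of_strings_after_split_with_list_of_string_alt
  induction ts generalizing inp with
  | nil => simp
  | cons t ts ih =>
    simp only [List.foldl_cons, ih, List.filter_filter]
    apply List.filter_congr
    intro s _
    simp [List.all_cons, Bool.and_comm]

-- ===== VERDICT (by name: the statement is the Claim_ definition above) =====
theorem filter_input_list_of_strings_after_split_with_list_of_string_spec : Claim_equal_filter_input_list_of_strings_after_split_with_list_of_string := by
  intro inp sep ts _ _
  unfold Spec_filter_input_list_of_strings_after_split_with_list_of_string
  rw [pv_A_eq_filter, pv_B_eq_filter]
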